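-- pv_equiv track=rewrite | github.com/glouppe-momo/tamagotchi | world/graveyard/spark-058/tools.py | weather_decode
-- ===== SOURCE A (Python) =====
-- def weather_decode(values: str) -> str:
--     """Decode the weather signal. Comma-separated weather words.
--     WEATHER has 13 entries (0-12). Even index=bit 0, odd=bit 1.
--     8 values = 1 ASCII char. 40 values = 5 chars = 'alive'."""
--     wlist = ["calm", "still", "humming", "restless", "electric", "bright",
--              "flickering", "shifting", "quiet", "warm", "cold", "dense", "heavy"]
--     words = [w.strip() for w in values.split(",")]
--     bits = [wlist.index(w) % 2 for w in words if w in wlist]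
--     chars = []
--     for i in range(0, len(bits) - 7, 8):
--         val = int("".join(str(b) for b in bits[i:i+8]), 2)
--         if 32 <= val < 127: chars.append(chr(val))
--     decoded = "".join(chars)
--     return f"decoded {len(words)} values -> '{decoded}'"
-- ===== SOURCE B (Python) =====
-- def weather_decode(values: str) -> str:
--     """Decode the weather signal in ONE streaming pass: no bits list, no
--     chunk slicing -- a running accumulator emits a char every 8 valid words."""
--     one = {"still", "restless", "bright", "shifting", "warm", "dense"}
--     zero = {"calm", "humming", "electric", "flickering", "quiet", "cold", "heavy"}
--     n = 0
--     val = 0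
--     cnt = 0
--     out = []
--     for part in values.split(","):
--         n += 1
--         w = part.strip()
--         if w in one or w in zero:
--             val = val * 2 + (1 if w in one else 0)
--             cnt += 1
--             if cnt == 8:
--                 if 32 <= val < 127:
--                     out.append(chr(val))
--                 val = 0
--                 cnt = 0
--     return f"decoded {n} values -> '{''.join(out)}'"
-- ===== Notes on version B (the rewrite author's own statement) =====
-- stated objective: alternative
-- what changed: Replaces A's three-phase pipeline (build a bits list, then a chunked index loop range(0,len-7,8) with slicing and int(...,2) string parsing) by a single streaming fold over the comma-separated parts that keeps a running accumulator and bit counter and emits a character each time 8 valid words have been seen; the word-to-bit map uses two membership sets instead of list.index(w)%2.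
import Mathlib
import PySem

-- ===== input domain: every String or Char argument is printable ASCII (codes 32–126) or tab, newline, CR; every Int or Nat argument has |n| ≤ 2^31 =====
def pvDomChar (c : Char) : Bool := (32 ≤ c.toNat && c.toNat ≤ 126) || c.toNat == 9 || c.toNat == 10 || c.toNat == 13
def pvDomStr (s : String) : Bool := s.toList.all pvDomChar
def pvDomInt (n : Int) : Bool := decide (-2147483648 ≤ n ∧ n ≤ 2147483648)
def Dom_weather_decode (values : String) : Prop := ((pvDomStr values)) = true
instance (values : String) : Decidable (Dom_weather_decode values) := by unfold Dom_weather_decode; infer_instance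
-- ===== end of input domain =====

-- B replaces A's bits-list + chunked slicing loop by one streaming fold with a running
-- accumulator (alternative decomposition; return values proved equal on all inputs).

-- ===== PORT A =====
def pvWlist : List String :=
  ["calm", "still", "humming", "restless", "electric", "bright",
   "flickering", "shifting", "quiet", "warm", "cold", "dense", "heavy"]

def weather_decode (values : String) : String :=
  let words := ((PySem.Str.split? values ",").getD []).map PySem.Str.strip
  let bits : List Int :=
    (words.filter (fun w => pvWlist.contains w)).map
      (fun w => PySem.Int.mod (((PySem.List.index? pvWlist w).getD 0 : Nat) : Int) 2)
  let chars : List Char :=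
    (PySem.List.pyRange 0 ((bits.length : Int) - 7) 8).foldl
      (fun chars i =>
        -- int("".join(str(b) for b in bits[i:i+8]), 2): exact binary fold, each b ∈ {0,1}
        let val : Int := (PySem.List.slice bits (some i) (some (i + 8))).foldl
            (fun a b => 2 * a + b) 0
        if 32 ≤ val ∧ val < 127 then chars ++ [Char.ofNat val.toNat] else chars) []
  "decoded " ++ PySem.Int.toStr (words.length : Int) ++ " values -> '" ++ String.ofList chars ++ "'"

-- ===== PORT B =====
def pvOne : PySem.Set String :=
  PySem.Set.ofList ["still", "restless", "bright", "shifting", "warm", "dense"]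
def pvZero : PySem.Set String :=
  PySem.Set.ofList ["calm", "humming", "electric", "flickering", "quiet", "cold", "heavy"]

def pvStepB (s : Nat × Int × Nat × List Char) (part : String) : Nat × Int × Nat × List Char :=
  let w := PySem.Str.strip part
  let n := s.1 + 1
  if pvOne.contains w || pvZero.contains w then
    let val := 2 * s.2.1 + (if pvOne.contains w then (1 : Int) else 0)
    let cnt := s.2.2.1 + 1
    if cnt = 8 then
      (n, 0, 0, if 32 ≤ val ∧ val < 127 then s.2.2.2 ++ [Char.ofNat val.toNat] else s.2.2.2)
    else (n, val, cnt, s.2.2.2)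
  else (n, s.2.1, s.2.2.1, s.2.2.2)

def weather_decode_alt (values : String) : String :=
  let r := ((PySem.Str.split? values ",").getD []).foldl pvStepB (0, 0, 0, [])
  "decoded " ++ PySem.Int.toStr (r.1 : Int) ++ " values -> '" ++ String.ofList r.2.2.2 ++ "'"

-- ===== PRECONDITION & SPEC =====
def Spec_weather_decode (values : String) (out : String) : Prop := out = weather_decode_alt values
instance (values : String) (out : String) : Decidable (Spec_weather_decode values out) := by unfold Spec_weather_decode; infer_instance

-- ===== CLAIM (what is proved, stated in full; the proofs are below) =====
def Claim_equal_weather_decode : Prop := ∀ (values : String), Dom_weather_decode values → Spec_weather_decode values (weather_decode values)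

-- ===== LEMMAS AND PROOFS =====

-- the bit A assigns to a known word
def pvBitA (w : String) : Int :=
  PySem.Int.mod (((PySem.List.index? pvWlist w).getD 0 : Nat) : Int) 2

def pvByteVal (c : List Int) : Int := c.foldl (fun a b => 2 * a + b) 0

def pvByteChars (v : Int) : List Char :=
  if 32 ≤ v ∧ v < 127 then [Char.ofNat v.toNat] else []

-- bit-level streaming step (pvStepB with the word decoding factored out)
def pvSStep (s : Int × Nat × List Char) (b : Int) : Int × Nat × List Char :=
  let val := 2 * s.1 + b
  let cnt := s.2.1 + 1
  if cnt = 8 then (0, 0, s.2.2 ++ pvByteChars val) else (val, cnt, s.2.2)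

-- the common reference: decode the bit list chunk by chunk
def pvChunkDecode (bits : List Int) : List Char :=
  if 8 ≤ bits.length then
    pvByteChars (pvByteVal (bits.take 8)) ++ pvChunkDecode (bits.drop 8)
  else []
termination_by bits.length
decreasing_by simp; omega

def pvBitsOf (parts : List String) : List Int :=
  ((parts.map PySem.Str.strip).filter (fun w => pvWlist.contains w)).map pvBitA

theorem pv_one_eq : (pvOne : List String) = ["still", "restless", "bright", "shifting", "warm", "dense"] := by decide

theorem pv_zero_eq : (pvZero : List String) = ["calm", "humming", "electric", "flickering", "quiet", "cold", "heavy"] := by decide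

theorem pv_contains_eq (w : String) :
    pvWlist.contains w = (pvOne.contains w || pvZero.contains w) := by
  rw [pv_one_eq, pv_zero_eq, Bool.eq_iff_iff]
  simp [pvWlist]
  tauto

theorem pv_mem_wlist (w : String) (h : pvWlist.contains w = true) :
    w = "calm" ∨ w = "still" ∨ w = "humming" ∨ w = "restless" ∨ w = "electric" ∨
    w = "bright" ∨ w = "flickering" ∨ w = "shifting" ∨ w = "quiet" ∨ w = "warm" ∨
    w = "cold" ∨ w = "dense" ∨ w = "heavy" := by
  simpa [pvWlist] using h

theorem pv_bit_eq (w : String) (h : pvWlist.contains w = true) :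
    pvBitA w = (if pvOne.contains w then (1 : Int) else 0) := by
  rcases pv_mem_wlist w h with rfl|rfl|rfl|rfl|rfl|rfl|rfl|rfl|rfl|rfl|rfl|rfl|rfl <;> decide

theorem pv_stepB_eq (s : Nat × Int × Nat × List Char) (part : String) :
    pvStepB s part =
      if pvWlist.contains (PySem.Str.strip part) then
        (s.1 + 1, pvSStep s.2 (pvBitA (PySem.Str.strip part)))
      else (s.1 + 1, s.2) := by
  by_cases h : pvWlist.contains (PySem.Str.strip part) = true
  · rw [if_pos h]
    rw [pvStepB]
    simp only [← pv_contains_eq, h, if_true, pv_bit_eq _ h, pvSStep, pvByteChars]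
    by_cases h8 : s.2.2.1 + 1 = 8 <;> simp [h8] <;> split_ifs <;> simp
  · rw [if_neg h, pvStepB]
    have hb : (pvOne.contains (PySem.Str.strip part) || pvZero.contains (PySem.Str.strip part)) = false := by
      rw [← pv_contains_eq]; simpa using h
    simp only [hb, Bool.false_eq_true, if_false]

theorem pv_foldB (parts : List String) (n : Nat) (s : Int × Nat × List Char) :
    parts.foldl pvStepB (n, s) =
      (n + parts.length, (pvBitsOf parts).foldl pvSStep s) := by
  induction parts generalizing n s with
  | nil => simp [pvBitsOf]
  | cons part parts ih =>
    rw [List.foldl_cons, pv_stepB_eq]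
    by_cases h : pvWlist.contains (PySem.Str.strip part) = true
    · rw [if_pos h, ih]
      have h' : (PySem.Str.strip part) ∈ pvWlist := by simpa using h
      have : pvBitsOf (part :: parts) = pvBitA (PySem.Str.strip part) :: pvBitsOf parts := by
        simp [pvBitsOf, h']
      rw [this, List.foldl_cons]
      simp [Prod.ext_iff]; omega
    · rw [if_neg h, ih]
      have h' : ¬ (PySem.Str.strip part) ∈ pvWlist := by simpa using h
      have : pvBitsOf (part :: parts) = pvBitsOf parts := by
        simp [pvBitsOf, h']
      rw [this]
      simp [Prod.ext_iff]; omega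

theorem pv_stream8 (c : List Int) (h : c.length = 8) (out : List Char) :
    c.foldl pvSStep (0, 0, out) = (0, 0, out ++ pvByteChars (pvByteVal c)) := by
  rcases c with _|⟨b0,_|⟨b1,_|⟨b2,_|⟨b3,_|⟨b4,_|⟨b5,_|⟨b6,_|⟨b7,_|⟨b8,c⟩⟩⟩⟩⟩⟩⟩⟩⟩ <;> simp at h
  simp [pvSStep, pvByteVal, List.foldl]

theorem pv_streamShort (c : List Int) (val : Int) (cnt : Nat) (out : List Char)
    (h : cnt + c.length < 8) :
    (c.foldl pvSStep (val, cnt, out)).2.2 = out := by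
  induction c generalizing val cnt with
  | nil => rfl
  | cons b c ih =>
    have hne : ¬ (cnt + 1 = 8) := by simp at h; omega
    simp only [List.foldl_cons, pvSStep, hne, if_false]
    exact ih _ _ (by simp at h ⊢; omega)

theorem pv_stream_chunks (bits : List Int) (out : List Char) :
    (bits.foldl pvSStep (0, 0, out)).2.2 = out ++ pvChunkDecode bits := by
  by_cases h : 8 ≤ bits.length
  · have hsplit : bits = bits.take 8 ++ bits.drop 8 := (List.take_append_drop 8 bits).symm
    have h8 : (bits.take 8).length = 8 := by simp; omega
    calc (bits.foldl pvSStep (0, 0, out)).2.2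
        = ((bits.take 8 ++ bits.drop 8).foldl pvSStep (0, 0, out)).2.2 := by rw [← hsplit]
      _ = ((bits.drop 8).foldl pvSStep ((bits.take 8).foldl pvSStep (0, 0, out))).2.2 := by
          rw [List.foldl_append]
      _ = ((bits.drop 8).foldl pvSStep (0, 0, out ++ pvByteChars (pvByteVal (bits.take 8)))).2.2 := by
          rw [pv_stream8 _ h8]
      _ = out ++ pvByteChars (pvByteVal (bits.take 8)) ++ pvChunkDecode (bits.drop 8) :=
          pv_stream_chunks (bits.drop 8) _
      _ = out ++ pvChunkDecode bits := by
          conv_rhs => rw [pvChunkDecode]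
          rw [if_pos h, List.append_assoc]
  · rw [pvChunkDecode, if_neg h]
    simpa using pv_streamShort bits 0 0 out (by omega)
termination_by bits.length
decreasing_by simp; omega

theorem pv_range_eq (L : Nat) :
    PySem.List.pyRange 0 ((L : Int) - 7) 8 =
      (List.range (L / 8)).map (fun k : Nat => ((8 * k : Nat) : Int)) := by
  rw [PySem.List.pyRange_of_pos _ _ (by norm_num)]
  by_cases h : (0 : Int) < (L : Int) - 7
  · rw [if_pos h]
    have : ((L : Int) - 7 - 0 + 8 - 1) = (L : Int) := by ring
    rw [this]
    have hdiv : ((L : Int) / 8).toNat = L / 8 := by omega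
    rw [hdiv]
    apply List.map_congr_left
    intro k _
    push_cast; ring
  · rw [if_neg h]
    have : L / 8 = 0 := by omega
    simp [this]

theorem pv_chunks_eq (bits : List Int) :
    (List.range (bits.length / 8)).flatMap
        (fun k : Nat => pvByteChars (pvByteVal ((bits.drop (8 * k)).take 8))) =
      pvChunkDecode bits := by
  by_cases h : 8 ≤ bits.length
  · have hn : bits.length / 8 = (bits.drop 8).length / 8 + 1 := by
      simp; omega
    rw [hn, List.range_succ_eq_map, List.flatMap_cons]
    rw [pvChunkDecode, if_pos h, ← pv_chunks_eq (bits.drop 8), List.flatMap_map]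
    simp only [Nat.mul_zero, List.drop_zero, Nat.succ_eq_add_one,
      List.drop_drop, List.length_drop,
      show ∀ a : Nat, 8 * (a + 1) = 8 + 8 * a from fun a => by ring]
  · rw [pvChunkDecode, if_neg h]
    have : bits.length / 8 = 0 := by omega
    simp [this]
termination_by bits.length
decreasing_by simp; omega

theorem pv_A_chars (bits : List Int) :
    (PySem.List.pyRange 0 ((bits.length : Int) - 7) 8).foldl
      (fun chars i =>
        let val : Int := (PySem.List.slice bits (some i) (some (i + 8))).foldl
            (fun a b => 2 * a + b) 0
        if 32 ≤ val ∧ val < 127 then chars ++ [Char.ofNat val.toNat] else chars) [] =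
    pvChunkDecode bits := by
  have hstep : (fun (chars : List Char) (i : Int) =>
        let val : Int := (PySem.List.slice bits (some i) (some (i + 8))).foldl
            (fun a b => 2 * a + b) 0
        if 32 ≤ val ∧ val < 127 then chars ++ [Char.ofNat val.toNat] else chars) =
      fun chars i => chars ++
        pvByteChars (pvByteVal (PySem.List.slice bits (some i) (some (i + 8)))) := by
    funext chars i
    simp only [pvByteChars, pvByteVal]
    split_ifs <;> simp
  rw [hstep, PySem.List.foldl_append_eq_flatMap, List.nil_append, pv_range_eq bits.length,
    List.flatMap_map]
  rw [← pv_chunks_eq bits]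
  apply congrArg₂ List.flatMap ?_ rfl
  funext k
  have : ((8 * k : Nat) : Int) + 8 = ((8 * k : Nat) : Int) + ((8 : Nat) : Int) := by norm_num
  simp only [this, PySem.List.slice_natCast_add]

-- ===== VERDICT (by name: the statement is the Claim_ definition above) =====
theorem weather_decode_spec : Claim_equal_weather_decode := by
  intro values _
  unfold Spec_weather_decode
  show weather_decode values = weather_decode_alt values
  rw [weather_decode, weather_decode_alt]
  have hbits : ((((PySem.Str.split? values ",").getD []).map PySem.Str.strip).filter
      (fun w => pvWlist.contains w)).map
      (fun w => PySem.Int.mod (((PySem.List.index? pvWlist w).getD 0 : Nat) : Int) 2) =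
      pvBitsOf ((PySem.Str.split? values ",").getD []) := rfl
  rw [hbits, pv_A_chars, pv_foldB, pv_stream_chunks]
  simp
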